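-- pv_equiv track=rewrite | github.com/cbrantley91/i7up | mysite/i7up/base/annotator/a_parser.py | getRawSentences
-- ===== SOURCE A (Python) =====
-- def getRawSentences(text):
--     sents = []
--     curr_string = ''
--     while text:
--         curr_string += text[0]
--         if text[0] == '"':
--             text = text[1:]
--             while text[0] != '"':
--                 curr_string += text[0]
--                 text = text[1:]
--             curr_string += '"'
--         if text[0] == '.':
--             sents.append(curr_string)
--             curr_string = ''
--         text = text[1:]
--
--     sents.append(curr_string);
--
--     return sents
-- ===== SOURCE B (Python) =====
-- def getRawSentences(text):
--     sents = []
--     curr = []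
--     in_quote = False
--     for ch in text:
--         curr.append(ch)
--         if ch == '"':
--             in_quote = not in_quote
--         elif ch == '.' and not in_quote:
--             sents.append(''.join(curr))
--             curr = []
--     sents.append(''.join(curr))
--     return sents
-- ===== Notes on version B (the rewrite author's own statement) =====
-- stated objective: faster
-- what changed: Replaced A's repeated string slicing and nested quote-scanning loop by a single pass over the characters with an in-quote flag and a list accumulator.
-- outside the precondition, e.g. on getRawSentences('"'): A raises IndexError, B returns ['"']
import Mathlib
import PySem

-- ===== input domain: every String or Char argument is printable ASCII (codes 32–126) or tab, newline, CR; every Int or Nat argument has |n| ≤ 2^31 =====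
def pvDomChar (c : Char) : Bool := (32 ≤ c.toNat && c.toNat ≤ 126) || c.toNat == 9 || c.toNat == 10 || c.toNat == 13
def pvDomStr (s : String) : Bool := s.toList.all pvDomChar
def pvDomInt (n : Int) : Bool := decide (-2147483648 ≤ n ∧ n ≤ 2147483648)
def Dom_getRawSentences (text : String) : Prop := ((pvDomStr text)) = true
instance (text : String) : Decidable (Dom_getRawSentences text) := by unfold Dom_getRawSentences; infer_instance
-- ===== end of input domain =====

-- B replaces A's nested quote loop and O(n^2) string slicing by a single pass with an
-- in-quote flag and a character accumulator (objective: faster, asymptotic O(n) vs O(n^2)).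

-- ===== PORT A =====
-- inner `while text[0] != '"'` loop of A: accumulates chars into curr until the next '"';
-- A raises IndexError when text runs out (excluded by Pre_), here it just stops.
def pvQuoteInner (curr : List Char) : List Char → (List Char × List Char)
  | [] => (curr, [])
  | c :: rest => if c = '"' then (curr, c :: rest) else pvQuoteInner (curr ++ [c]) rest

-- needed by aLoop's termination proof (cited in decreasing_by)
theorem pvQuoteInner_len (curr : List Char) (l : List Char) :
    (pvQuoteInner curr l).2.length ≤ l.length := by
  induction l generalizing curr with
  | nil => simp [pvQuoteInner]
  | cons c rest ih =>
    simp only [pvQuoteInner]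
    split
    · simp
    · exact le_trans (ih _) (Nat.le_succ _)

-- outer `while text:` loop of A, step for step
def pvALoop (text curr : List Char) (sents : List (List Char)) : List (List Char) :=
  match text with
  | [] => sents ++ [curr]
  | c :: rest =>
    let curr1 := curr ++ [c]
    if c = '"' then
      let p := pvQuoteInner curr1 rest
      let curr2 := p.1 ++ ['"']
      if hq : p.2 = [] then sents ++ [curr2]   -- A raises (IndexError) here; outside Pre_
      else
        let d := p.2.head hq
        let t2 := p.2.tail
        if d = '.' then pvALoop t2 [] (sents ++ [curr2])
        else pvALoop t2 curr2 sents
    else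
      if c = '.' then pvALoop rest [] (sents ++ [curr1])
      else pvALoop rest curr1 sents
termination_by text.length
decreasing_by
  · simp only [t2, p, curr1] at hq ⊢
    have h1 := pvQuoteInner_len (curr ++ [c]) rest
    have h2 : (pvQuoteInner (curr ++ [c]) rest).2.length ≠ 0 := by
      simpa [List.length_eq_zero_iff] using hq
    simp [List.length_tail]
    omega
  · simp only [t2, p, curr1] at hq ⊢
    have h1 := pvQuoteInner_len (curr ++ [c]) rest
    have h2 : (pvQuoteInner (curr ++ [c]) rest).2.length ≠ 0 := by
      simpa [List.length_eq_zero_iff] using hq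
    simp [List.length_tail]
    omega
  · simp
  · simp

def getRawSentences (text : String) : List String :=
  (pvALoop text.toList [] []).map String.ofList

-- ===== PORT B =====
-- single pass with an in-quote flag (Source B's loop)
def pvBLoop (text curr : List Char) (inq : Bool) (sents : List (List Char)) : List (List Char) :=
  match text with
  | [] => sents ++ [curr]
  | c :: rest =>
    let curr1 := curr ++ [c]
    if c = '"' then pvBLoop rest curr1 (!inq) sents
    else if c = '.' ∧ inq = false then pvBLoop rest [] inq (sents ++ [curr1])
    else pvBLoop rest curr1 inq sents

def getRawSentences_alt (text : String) : List String :=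
  (pvBLoop text.toList [] false []).map String.ofList

-- ===== PRECONDITION & SPEC =====
-- Pre_ excludes exactly the inputs with an odd number of '"': there A's inner quote loop
-- runs off the end of the string and raises IndexError.
def Pre_getRawSentences (text : String) : Prop := (text.toList.count '"') % 2 = 0
instance (text : String) : Decidable (Pre_getRawSentences text) := by unfold Pre_getRawSentences; infer_instance
def pvWitness_getRawSentences : String := "a.\"b.c\".d"

def Spec_getRawSentences (text : String) (out : List String) : Prop := out = getRawSentences_alt text
instance (text : String) (out : List String) : Decidable (Spec_getRawSentences text out) := by unfold Spec_getRawSentences; infer_instance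

-- ===== CLAIM (what is proved, stated in full; the proofs are below) =====
def Claim_equal_getRawSentences : Prop := ∀ (text : String), Dom_getRawSentences text → Pre_getRawSentences text → Spec_getRawSentences text (getRawSentences text)

-- ===== LEMMAS AND PROOFS =====

-- pvQuoteInner is takeWhile/dropWhile at the next '"'
theorem pvQuoteInner_eq (curr l : List Char) :
    pvQuoteInner curr l = (curr ++ l.takeWhile (· ≠ '"'), l.dropWhile (· ≠ '"')) := by
  induction l generalizing curr with
  | nil => simp [pvQuoteInner]
  | cons c rest ih =>
    by_cases h : c = '"' <;> simp [pvQuoteInner, List.takeWhile, List.dropWhile, h, ih]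

-- pvBLoop in quote mode consumes chars up to the closing '"' exactly like pvQuoteInner
theorem pvBLoop_inq (l curr : List Char) (sents : List (List Char)) :
    pvBLoop l curr true sents =
      match l.dropWhile (· ≠ '"') with
      | [] => sents ++ [curr ++ l]
      | _ :: t2 => pvBLoop t2 (curr ++ l.takeWhile (· ≠ '"') ++ ['"']) false sents := by
  induction l generalizing curr with
  | nil => simp [pvBLoop]
  | cons c rest ih =>
    by_cases h : c = '"'
    · simp [pvBLoop, List.dropWhile, List.takeWhile, h]
    · simp [pvBLoop, List.dropWhile, List.takeWhile, h, ih]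

theorem pvLoop_agree (n : ℕ) : ∀ (l : List Char), l.length ≤ n → ∀ (curr : List Char)
    (sents : List (List Char)), (l.count '"') % 2 = 0 →
    pvALoop l curr sents = pvBLoop l curr false sents := by
  induction n with
  | zero =>
    intro l hl curr sents _
    interval_cases h : l.length
    rw [List.length_eq_zero_iff] at h; subst h
    simp [pvALoop, pvBLoop]
  | succ n ih =>
    intro l hl curr sents hcnt
    match l with
    | [] => simp [pvALoop, pvBLoop]
    | c :: rest =>
      by_cases h : c = '"'
      · -- quote branch: count in rest is odd, so rest contains a '"'
        subst h
        have hodd : (rest.count '"') % 2 = 1 := by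
          simp [List.count_cons] at hcnt; omega
        have hmem : '"' ∈ rest := by
          by_contra hm
          rw [List.count_eq_zero_of_not_mem hm] at hodd; simp at hodd
        have hdw : rest.dropWhile (· ≠ '"') ≠ [] := by
          intro he
          have := List.takeWhile_append_dropWhile (p := (· ≠ '"')) (l := rest)
          rw [he, List.append_nil] at this
          rw [← this] at hmem
          have := List.mem_takeWhile_imp hmem
          simp at this
        obtain ⟨d, t2, hdt⟩ := List.exists_cons_of_ne_nil hdw
        have hd : d = '"' := by
          have hpos : 0 < (rest.dropWhile (· ≠ '"')).length := by rw [hdt]; simp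
          have := List.dropWhile_get_zero_not (p := fun x => decide (x ≠ '"')) rest hpos
          simp only [List.get_eq_getElem, hdt, List.getElem_cons_zero] at this
          simpa using this
        -- count bookkeeping: rest = takeWhile ++ d :: t2, takeWhile has no '"'
        have hsplit := List.takeWhile_append_dropWhile (p := (· ≠ '"')) (l := rest)
        have htw : (rest.takeWhile (· ≠ '"')).count '"' = 0 := by
          rw [List.count_eq_zero]
          intro hm
          have := List.mem_takeWhile_imp hm
          simp at this
        have ht2 : (t2.count '"') % 2 = 0 := by
          have : rest.count '"' = (rest.takeWhile (· ≠ '"')).count '"' + (d :: t2).count '"' := by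
            conv_lhs => rw [← hsplit, hdt]
            rw [List.count_append]
          rw [htw, List.count_cons] at this
          simp [hd] at this
          omega
        have hlen : t2.length ≤ n := by
          have h1 : (rest.takeWhile (· ≠ '"')).length + (d :: t2).length = rest.length := by
            conv_rhs => rw [← hsplit, hdt]; rw [List.length_append]
          simp at h1 hl
          omega
        rw [pvALoop]
        conv_rhs => rw [pvBLoop]
        simp only [if_pos rfl, Bool.not_false]
        rw [pvBLoop_inq, hdt]
        subst hd
        simp only [pvQuoteInner_eq, hdt]
        rw [dif_neg (by simp)]
        simp only [List.head_cons, List.tail_cons,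
          if_neg (show ¬('"' = '.') by decide)]
        rw [ih t2 hlen _ _ ht2]
        simp [List.append_assoc]
      · -- ordinary char
        have hrest : (rest.count '"') % 2 = 0 := by
          simp [List.count_cons, h] at hcnt ⊢
          omega
        have hlen : rest.length ≤ n := by simp at hl; omega
        by_cases hp : c = '.'
        · rw [pvALoop, pvBLoop]
          simp only [h, hp, if_neg, if_false]
          simp [h, hp, ih rest hlen _ _ hrest]
        · rw [pvALoop, pvBLoop]
          simp [h, hp, ih rest hlen _ _ hrest]

-- ===== VERDICT (by name: the statement is the Claim_ definition above) =====
theorem getRawSentences_spec : Claim_equal_getRawSentences := by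
  intro text _ hpre
  unfold Spec_getRawSentences getRawSentences getRawSentences_alt
  rw [pvLoop_agree text.toList.length _ le_rfl _ _ hpre]
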